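-- pv_equiv track=rewrite | github.com/vikovik/hurricane_analysis | script.py | max_hurricane_count
-- ===== SOURCE A (Python) =====
-- def max_hurricane_count(areas_affected_count):
--     max_hurricane_count = 0
--     max_area_affected = ""
--
--     for key, value in areas_affected_count.items():
--
--         if value > max_hurricane_count:
--             max_hurricane_count = value
--             max_area_affected = key
--
--         else:
--             continue
--
--     return max_hurricane_count, max_area_affected
-- ===== SOURCE B (Python) =====
-- def max_hurricane_count(areas_affected_count):
--     # Two passes: find the maximum value, then locate its first key.
--     if not areas_affected_count:
--         return 0, ""
--     m = max(areas_affected_count.values())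
--     if m <= 0:
--         return 0, ""
--     for key, value in areas_affected_count.items():
--         if value == m:
--             return m, key
-- ===== Notes on version B (the rewrite author's own statement) =====
-- stated objective: alternative
-- what changed: Replaces A's single running-max scan (threshold starting at 0) with a two-pass decomposition: compute the maximum of the values first, keep the zero default whenever no value exceeds the threshold, otherwise return the maximum paired with the first key carrying it.
import Mathlib
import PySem

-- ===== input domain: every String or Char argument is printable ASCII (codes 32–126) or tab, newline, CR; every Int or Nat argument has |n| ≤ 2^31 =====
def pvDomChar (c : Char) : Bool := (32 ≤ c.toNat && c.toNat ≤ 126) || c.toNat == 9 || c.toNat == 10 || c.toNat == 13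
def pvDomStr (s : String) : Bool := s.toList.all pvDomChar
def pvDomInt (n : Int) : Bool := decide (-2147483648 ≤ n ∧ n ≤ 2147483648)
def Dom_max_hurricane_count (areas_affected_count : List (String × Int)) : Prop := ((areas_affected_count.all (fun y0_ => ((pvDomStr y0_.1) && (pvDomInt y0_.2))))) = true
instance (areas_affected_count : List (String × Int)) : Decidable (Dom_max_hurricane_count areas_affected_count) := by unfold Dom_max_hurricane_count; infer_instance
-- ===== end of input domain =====

-- B replaces A's single running-max scan by a two-pass decomposition (max of values, then first key with that value); same cost, alternative structure.

-- ===== PORT A =====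
-- A: single scan with a running maximum starting at 0 and its key.
def max_hurricane_count (areas_affected_count : List (String × Int)) : Int × String :=
  areas_affected_count.foldl
    (fun acc kv => if kv.2 > acc.1 then (kv.2, kv.1) else acc)
    (0, "")

-- ===== PORT B =====
-- B: m = max(values()) (none = empty dict); (0,"") when empty or m ≤ 0; else first key with value m.
def max_hurricane_count_alt (areas_affected_count : List (String × Int)) : Int × String :=
  match PySem.List.max? (areas_affected_count.map Prod.snd) (fun v => v) with
  | none => (0, "")
  | some m =>
    if m ≤ 0 then (0, "")
    else
      match areas_affected_count.find? (fun p => p.2 == m) with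
      | some p => (m, p.1)
      | none => (0, "")   -- unreachable: m is a value of the list

-- ===== PRECONDITION & SPEC =====
def Spec_max_hurricane_count (areas_affected_count : List (String × Int)) (out : Int × String) : Prop := out = max_hurricane_count_alt areas_affected_count
instance (areas_affected_count : List (String × Int)) (out : Int × String) : Decidable (Spec_max_hurricane_count areas_affected_count out) := by unfold Spec_max_hurricane_count; infer_instance

-- ===== CLAIM (what is proved, stated in full; the proofs are below) =====
def Claim_equal_max_hurricane_count : Prop := ∀ (areas_affected_count : List (String × Int)), Dom_max_hurricane_count areas_affected_count → Spec_max_hurricane_count areas_affected_count (max_hurricane_count areas_affected_count)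

-- ===== LEMMAS AND PROOFS =====

-- the initial accumulator is a lower bound of the running max
theorem pv_fm_init (l : List Int) (a : Int) : a ≤ l.foldl max a := by
  induction l generalizing a with
  | nil => simp
  | cons v t ih => exact le_trans (le_max_left a v) (ih (max a v))

-- every element is a lower bound of the running max
theorem pv_fm_mem (l : List Int) (a v : Int) (hv : v ∈ l) : v ≤ l.foldl max a := by
  induction l generalizing a with
  | nil => cases hv
  | cons w t ih =>
    rcases List.mem_cons.mp hv with h | h
    · subst h; exact le_trans (le_max_right a v) (pv_fm_init t _)
    · exact ih _ h

-- pulling a max out of the seed of a running max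
theorem pv_fm_pull (l : List Int) (a b : Int) :
    l.foldl max (max a b) = max a (l.foldl max b) := by
  induction l generalizing b with
  | nil => simp
  | cons v t ih => simpa [max_assoc] using ih (max b v)

-- A's loop keeps the accumulator when nothing beats it
theorem pv_A_stay (l : List (String × Int)) (c : Int) (s : String)
    (h : ∀ p ∈ l, p.2 ≤ c) :
    l.foldl (fun acc kv => if kv.2 > acc.1 then (kv.2, kv.1) else acc) (c, s) = (c, s) := by
  induction l with
  | nil => rfl
  | cons q t ih =>
    have hq : ¬ (q.2 > c) := not_lt.mpr (h q (List.mem_cons_self))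
    simp only [List.foldl_cons, hq, if_false]
    exact ih (fun p hp => h p (List.mem_cons_of_mem _ hp))

-- when something beats the threshold, A's loop returns the max together with its first key
theorem pv_A_key (l : List (String × Int)) (c : Int) (s : String)
    (h : c < (l.map Prod.snd).foldl max c) :
    ∃ p, l.find? (fun q => q.2 == (l.map Prod.snd).foldl max c) = some p ∧
      l.foldl (fun acc kv => if kv.2 > acc.1 then (kv.2, kv.1) else acc) (c, s) = (p.2, p.1) := by
  induction l generalizing c s with
  | nil => simp at h
  | cons q t ih =>
    simp only [List.map_cons, List.foldl_cons] at h ⊢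
    by_cases hq : q.2 > c
    · -- q improves the running max
      have hmax : max c q.2 = q.2 := max_eq_right (le_of_lt hq)
      rw [hmax] at h ⊢
      by_cases htop : (t.map Prod.snd).foldl max q.2 = q.2
      · -- q is already the overall max: find? stops at q, the loop keeps (q.2, q.1)
        refine ⟨q, ?_, ?_⟩
        · rw [List.find?_cons_of_pos]
          simp [htop]
        · simp only [hq, if_pos]
          exact pv_A_stay t q.2 q.1 (fun p hp => by
            have := pv_fm_mem (t.map Prod.snd) q.2 p.2 (List.mem_map_of_mem hp)
            omega)
      · have hlt : q.2 < (t.map Prod.snd).foldl max q.2 :=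
          lt_of_le_of_ne (pv_fm_init _ _) (fun e => htop e.symm)
        obtain ⟨p, hfind, hfold⟩ := ih q.2 q.1 hlt
        refine ⟨p, ?_, ?_⟩
        · rw [List.find?_cons_of_neg]
          · exact hfind
          · simp; omega
        · simp only [hq, if_pos]; exact hfold
    · -- q does not beat c
      have hmax : max c q.2 = c := max_eq_left (not_lt.mp hq)
      rw [hmax] at h ⊢
      obtain ⟨p, hfind, hfold⟩ := ih c s h
      refine ⟨p, ?_, ?_⟩
      · rw [List.find?_cons_of_neg]
        · exact hfind
        · have : c < (t.map Prod.snd).foldl max c := h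
          simp; omega
      · simp only [hq, if_false]; exact hfold

-- ===== VERDICT (by name: the statement is the Claim_ definition above) =====
theorem max_hurricane_count_spec : Claim_equal_max_hurricane_count := by
  unfold Claim_equal_max_hurricane_count
  intro l _
  unfold Spec_max_hurricane_count max_hurricane_count max_hurricane_count_alt
  cases l with
  | nil => rfl
  | cons q t =>
    have hm : PySem.List.max? ((q :: t).map Prod.snd) (fun v => v)
        = some ((t.map Prod.snd).foldl max q.2) := by
      simp [PySem.List.max?_id_cons]
    simp only [hm]
    set m := (t.map Prod.snd).foldl max q.2 with hmdef
    by_cases hle : m ≤ 0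
    · -- every value ≤ m ≤ 0: A's loop never fires
      simp only [hle, if_true]
      exact pv_A_stay (q :: t) 0 "" (fun p hp => by
        rcases List.mem_cons.mp hp with h | h
        · have := pv_fm_init (t.map Prod.snd) q.2
          subst h; omega
        · have := pv_fm_mem (t.map Prod.snd) q.2 p.2 (List.mem_map_of_mem h)
          omega)
    · simp only [hle, if_false]
      have hfold0 : ((q :: t).map Prod.snd).foldl max 0 = m := by
        simp only [List.map_cons, List.foldl_cons]
        have : max 0 q.2 = max 0 (max q.2 q.2) := by simp
        calc (t.map Prod.snd).foldl max (max 0 q.2)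
            = max 0 ((t.map Prod.snd).foldl max q.2) := pv_fm_pull _ 0 q.2
          _ = m := by rw [← hmdef]; omega
      have h0 : (0 : Int) < ((q :: t).map Prod.snd).foldl max 0 := by
        rw [hfold0]; omega
      obtain ⟨p, hfind, hfold⟩ := pv_A_key (q :: t) 0 "" h0
      rw [hfold0] at hfind
      rw [hfold]
      simp only [hfind]
      have hp2 : p.2 = m := by
        have := List.find?_some hfind
        simpa using this
      rw [hp2]
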